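-- pv_equiv track=rewrite | github.com/JoshuaKeegan3/random-python | google/prime_string.py | solution
-- ===== SOURCE A (Python) =====
-- def solution(i):
--    """The function returns a string of numbers
--    finds all prime numbers starting from 2 until the sum of the characters is > i+5
--    returns the last 5 characters
--    """
--    # Initualise variables
--    primes = []                # All found primes used in calculation of next primes
--
--    curr_number=2              # Current number to check if is prime
--                               # Initalised at the first prime
--
--    prime_string =""           # String of all found prime numbers
--
--    # Get all the required primes
--    while len(prime_string)<i+5: # While we don't have all required indicies
--
--       # Check if the number is prime
--       for prime in primes:
--          if curr_number%prime==0: # If it is go to the next number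
--             break
--       else:
--          primes.append(curr_number) # Add the prime to the list for future calculations
--
--          # Add the characters to the character string
--          for c in str(curr_number):
--             if len(prime_string)<i+5: # Stop over flow
--                prime_string+=c
--
--       # Got to the next number
--       curr_number+=1
--
--    # Take the last 5 values
--    prime_string = prime_string[-5:]
--    return prime_string
-- ===== SOURCE B (Python) =====
-- def _is_prime(k):
--     if k < 2:
--         return False
--     d = 2
--     while d * d <= k:
--         if k % d == 0:
--             return False
--         d += 1
--     return True
--
--
-- def solution(i):
--     n = i + 5
--     if n <= 0:
--         return ""
--     chars = []
--     k = 2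
--     while len(chars) < n:
--         if _is_prime(k):
--             chars.extend(str(k))
--         k += 1
--     return ''.join(chars)[:n][-5:]
-- ===== Notes on version B (the rewrite author's own statement) =====
-- stated objective: faster
-- what changed: A keeps the list of all primes found so far and trial-divides each candidate by every one of them; B drops that list entirely and tests each candidate by trial division only up to its square root, collecting digits in a list joined once at the end and truncated after the loop instead of character-by-character.
import Mathlib
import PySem

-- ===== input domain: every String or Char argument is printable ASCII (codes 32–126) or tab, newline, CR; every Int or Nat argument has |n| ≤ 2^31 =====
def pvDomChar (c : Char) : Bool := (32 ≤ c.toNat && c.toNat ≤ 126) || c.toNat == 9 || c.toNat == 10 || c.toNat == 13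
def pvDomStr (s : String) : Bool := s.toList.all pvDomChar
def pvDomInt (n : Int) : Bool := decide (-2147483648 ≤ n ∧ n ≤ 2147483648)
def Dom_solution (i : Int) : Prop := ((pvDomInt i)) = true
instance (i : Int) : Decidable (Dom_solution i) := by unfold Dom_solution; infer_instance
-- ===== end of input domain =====

-- B replaces A's divide-by-every-previous-prime test with trial division up to the
-- square root and truncates the digit string once after the loop (measured faster).

-- ===== PORT A =====

-- helper facts the ports' termination/invariant proofs cite by name

-- str(curr) is never the empty string
theorem pvToDigitsCore_ne_nil (b f n : Nat) (ds : List Char) (h : ds ≠ []) :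
    Nat.toDigitsCore b f n ds ≠ [] := by
  induction f generalizing n ds with
  | zero => simpa [Nat.toDigitsCore] using h
  | succ f ih =>
      simp only [Nat.toDigitsCore]
      split
      · simp
      · exact ih _ _ (by simp)

theorem pvToChars_ne_nil (k : Nat) : PySem.Int.toChars (k : Int) ≠ [] := by
  simp only [PySem.Int.toChars]
  rw [if_neg (by omega), Nat.toDigits, Nat.toDigitsCore]
  split
  · simp
  · exact pvToDigitsCore_ne_nil 10 _ _ _ (by simp)

-- gap to the least prime ≥ k: the termination measure of both while loops
def pvNextPrimeGap (k : Nat) : Nat := Nat.find (Nat.exists_infinite_primes k) - k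

theorem pvNextPrimeGap_decr (k : Nat) (h : ¬ Nat.Prime k) :
    pvNextPrimeGap (k + 1) < pvNextPrimeGap k := by
  have h1 := Nat.find_spec (Nat.exists_infinite_primes k)
  have h2 := Nat.find_spec (Nat.exists_infinite_primes (k + 1))
  have hlt : k < Nat.find (Nat.exists_infinite_primes k) :=
    Nat.lt_of_le_of_ne h1.1 (fun e => h (e ▸ h1.2))
  have hq_le : Nat.find (Nat.exists_infinite_primes (k + 1)) ≤
      Nat.find (Nat.exists_infinite_primes k) :=
    Nat.find_min' _ ⟨hlt, h1.2⟩
  have hp_le : Nat.find (Nat.exists_infinite_primes k) ≤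
      Nat.find (Nat.exists_infinite_primes (k + 1)) :=
    Nat.find_min' _ ⟨Nat.le_of_succ_le h2.1, h2.2⟩
  unfold pvNextPrimeGap
  rw [Nat.le_antisymm hq_le hp_le]
  exact Nat.sub_lt_sub_left hlt (Nat.lt_succ_self k)

-- small named facts so the loops' decreasing proofs stay tiny terms
theorem pvLexRight {α β : Type} [LT α] [LT β] (x : α) {a b : β} (h : a < b) :
    Prod.Lex (fun a₁ a₂ : α => a₁ < a₂) (fun a₁ a₂ : β => a₁ < a₂) (x, a) (x, b) :=
  Prod.Lex.right x h

theorem pvLexLeft {α β : Type} [LT α] [LT β] {a b : α} (h : a < b) (y z : β) :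
    Prod.Lex (fun a₁ a₂ : α => a₁ < a₂) (fun a₁ a₂ : β => a₁ < a₂) (a, y) (b, z) :=
  Prod.Lex.left _ _ h

theorem pvLe_mul_self (d : Nat) : d ≤ d * d := by
  cases d with
  | zero => exact Nat.zero_le _
  | succ m => exact Nat.le_mul_of_pos_left _ (Nat.succ_pos m)

theorem pvDecTrial (k d : Nat) (h : d * d ≤ k) : k + 1 - (d + 1) < k + 1 - d :=
  Nat.sub_lt_sub_left (Nat.lt_succ_of_le (le_trans (pvLe_mul_self d) h)) (Nat.lt_succ_self d)

theorem pvLt_of_sq_le (k d : Nat) (hd : 2 ≤ d) (h : d * d ≤ k) : d < k := by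
  have h1 : 1 * d < d * d := Nat.mul_lt_mul_of_lt_of_le (by omega) (le_refl d) (by omega)
  omega

theorem pvDecGrow (n a b : Nat) (hs : a < n) (ht : a < b) : n - b < n - a :=
  Nat.sub_lt_sub_left hs ht

-- a divisor 2 ≤ p < k means k is composite
theorem pvNotPrime_of_dvd (k p : Nat) (h2 : 2 ≤ p) (hlt : p < k) (hdvd : p ∣ k) :
    ¬ Nat.Prime k := fun hk => by
  rcases hk.eq_one_or_self_of_dvd p hdvd with h | h <;> omega

-- if no prime < k divides k (and 2 ≤ k) then k is prime
theorem pvPrime_of_no_small (k : Nat) (hk : 2 ≤ k)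
    (h : ∀ p, Nat.Prime p → p < k → k % p ≠ 0) : Nat.Prime k := by
  by_contra hnp
  have h1 : Nat.minFac k ≠ k := fun e => hnp (Nat.prime_def_minFac.mpr ⟨hk, e⟩)
  have h2 : Nat.minFac k ∣ k := Nat.minFac_dvd k
  have h3 : Nat.Prime (Nat.minFac k) := Nat.minFac_prime (by omega)
  have h4 : Nat.minFac k < k := Nat.lt_of_le_of_ne (Nat.le_of_dvd (by omega) h2) h1
  exact h (Nat.minFac k) h3 h4 (Nat.mod_eq_zero_of_dvd h2)

-- A's for/else test over the accumulated prime list, characterized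
theorem pvAnyDiv_iff (k : Nat) (primes : List Nat) (hk : 2 ≤ k)
    (hp : ∀ p, p ∈ primes ↔ Nat.Prime p ∧ p < k) :
    (primes.any (fun p => k % p == 0) = true) ↔ ¬ Nat.Prime k := by
  simp only [List.any_eq_true, beq_iff_eq]
  constructor
  · rintro ⟨p, hmem, hmod⟩
    have hm := (hp p).mp hmem
    exact pvNotPrime_of_dvd k p hm.1.two_le hm.2 (Nat.dvd_of_mod_eq_zero hmod)
  · intro hnp
    by_contra hno
    push_neg at hno
    exact hnp (pvPrime_of_no_small k hk (fun p hpr hlt => hno p ((hp p).mpr ⟨hpr, hlt⟩)))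

-- invariant update: composite step
theorem pvInvComp (k : Nat) (primes : List Nat) (hk : 2 ≤ k)
    (hp : ∀ p, p ∈ primes ↔ Nat.Prime p ∧ p < k)
    (h : primes.any (fun p => k % p == 0) = true) :
    ∀ p, p ∈ primes ↔ Nat.Prime p ∧ p < k + 1 := by
  have hnp : ¬ Nat.Prime k := (pvAnyDiv_iff k primes hk hp).mp h
  intro p
  rw [hp p]
  constructor
  · rintro ⟨a, b⟩; exact ⟨a, by omega⟩
  · rintro ⟨a, b⟩
    refine ⟨a, ?_⟩
    rcases Nat.lt_succ_iff_lt_or_eq.mp b with h' | h'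
    · exact h'
    · exact absurd (h' ▸ a) hnp

-- invariant update: prime step
theorem pvInvPrime (k : Nat) (primes : List Nat) (hk : 2 ≤ k)
    (hp : ∀ p, p ∈ primes ↔ Nat.Prime p ∧ p < k)
    (h : ¬ primes.any (fun p => k % p == 0) = true) :
    ∀ p, p ∈ primes ++ [k] ↔ Nat.Prime p ∧ p < k + 1 := by
  have hkp : Nat.Prime k := by
    by_contra hnp
    exact h ((pvAnyDiv_iff k primes hk hp).mpr hnp)
  intro p
  simp only [List.mem_append, List.mem_singleton, hp p]
  constructor
  · rintro (⟨a, b⟩ | rfl)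
    · exact ⟨a, by omega⟩
    · exact ⟨hkp, by omega⟩
  · rintro ⟨a, b⟩
    rcases Nat.lt_succ_iff_lt_or_eq.mp b with h' | h'
    · exact Or.inl ⟨a, h'⟩
    · exact Or.inr h'

-- inner 'for c in str(curr): if len(prime_string) < i+5: prime_string += c'
def pvAddChars (n : Nat) (s digs : List Char) : List Char :=
  digs.foldl (fun acc c => if acc.length < n then acc ++ [c] else acc) s

theorem pvAddChars_eq (n : Nat) (digs s : List Char) (h : s.length ≤ n) :
    pvAddChars n s digs = (s ++ digs).take n := by
  induction digs generalizing s with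
  | nil => simp [pvAddChars, List.take_of_length_le h]
  | cons c digs ih =>
      simp only [pvAddChars, List.foldl_cons]
      by_cases hc : s.length < n
      · rw [if_pos hc]
        have := ih (s ++ [c]) (by simp; omega)
        simpa [pvAddChars, List.append_assoc] using this
      · rw [if_neg hc]
        have hn : n ≤ s.length := by omega
        have := ih s h
        simp only [pvAddChars] at this
        rw [this, List.take_append_of_le_length hn, List.take_append_of_le_length hn]

theorem pvAddChars_grow (n k : Nat) (s : List Char) (hs : s.length < n) :
    s.length < (pvAddChars n s (PySem.Int.toChars (k : Int))).length := by
  rw [pvAddChars_eq n _ s (Nat.le_of_lt hs), List.length_take, List.length_append]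
  have h1 : 1 ≤ (PySem.Int.toChars (k : Int)).length :=
    List.length_pos_iff.mpr (pvToChars_ne_nil k)
  omega

-- A's while loop; primes/curr_number/prime_string are the loop state; the invariant
-- 'primes = all primes below curr' is carried as a hypothesis (the loop terminates
-- only because of it); n is i+5 (lengths compared as naturals since len ≥ 0)
def pvLoopA (n : Nat) (primes : List Nat) (k : Nat) (s : List Char)
    (hk : 2 ≤ k) (hp : ∀ p, p ∈ primes ↔ Nat.Prime p ∧ p < k) : List Char :=
  if hs : s.length < n then
    if hd : primes.any (fun p => k % p == 0) then
      pvLoopA n primes (k + 1) s (by omega) (pvInvComp k primes hk hp hd)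
    else
      pvLoopA n (primes ++ [k]) (k + 1)
        (pvAddChars n s (PySem.Int.toChars (k : Int))) (by omega)
        (pvInvPrime k primes hk hp hd)
  else s
termination_by (n - s.length, pvNextPrimeGap k)
decreasing_by
  · exact pvLexRight _ (pvNextPrimeGap_decr k ((pvAnyDiv_iff k primes hk hp).mp hd))
  · exact pvLexLeft (pvDecGrow n s.length _ hs (pvAddChars_grow n k s hs)) _ _

def solution (i : Int) : String :=
  -- 'len(prime_string) < i+5' ⇔ 'length < (i+5).toNat', since a length is ≥ 0
  let s := pvLoopA (i + 5).toNat [] 2 [] (by omega)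
    (fun p => ⟨by simp, fun h => absurd h.1.two_le (by omega)⟩)
  String.ofList (PySem.List.slice s (some (-5)) none)   -- prime_string[-5:]

-- ===== PORT B =====

-- while d*d <= k: if k % d == 0: return False; d += 1   /   return True
def pvTrial (k d : Nat) : Bool :=
  if d * d ≤ k then
    if k % d == 0 then false else pvTrial k (d + 1)
  else true
termination_by k + 1 - d
decreasing_by exact pvDecTrial k d (by assumption)

def pvIsPrimeB (k : Nat) : Bool := if k < 2 then false else pvTrial k 2

-- pvTrial is a correct primality test (pvLoopB's termination cites this)
theorem pvTrial_eq (k d : Nat) (hk : 2 ≤ k) (hd : 2 ≤ d)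
    (h : ∀ e, 2 ≤ e → e < d → ¬ e ∣ k) : pvTrial k d = decide (Nat.Prime k) := by
  rw [pvTrial]
  by_cases hle : d * d ≤ k
  · rw [if_pos hle]
    by_cases hmod : k % d = 0
    · rw [if_pos (by simpa using hmod)]
      have hdk : d < k := pvLt_of_sq_le k d hd hle
      have : ¬ Nat.Prime k :=
        pvNotPrime_of_dvd k d hd hdk (Nat.dvd_of_mod_eq_zero hmod)
      simp [this]
    · rw [if_neg (by simpa using hmod)]
      exact pvTrial_eq k (d + 1) hk (by omega)
        (fun e he hlt => by
          rcases Nat.lt_succ_iff_lt_or_eq.mp hlt with h' | h'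
          · exact h e he h'
          · subst h'; exact fun hdvd => hmod (Nat.mod_eq_zero_of_dvd hdvd))
  · rw [if_neg hle]
    have : Nat.Prime k := by
      rw [Nat.prime_def_le_sqrt]
      refine ⟨hk, fun m hm hms => ?_⟩
      have h1 : m * m ≤ k := Nat.le_sqrt.mp hms
      have h2 : m < d := Nat.mul_self_lt_mul_self_iff.mp
        (Nat.lt_of_le_of_lt h1 (Nat.lt_of_not_le hle))
      exact h m hm h2
    simp [this]
termination_by k + 1 - d
decreasing_by exact pvDecTrial k d hle

theorem pvIsPrimeB_eq (k : Nat) : pvIsPrimeB k = decide (Nat.Prime k) := by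
  unfold pvIsPrimeB
  by_cases h : k < 2
  · have : ¬ Nat.Prime k := fun hp => absurd hp.two_le (by omega)
    simp [h, this]
  · rw [if_neg h]
    exact pvTrial_eq k 2 (by omega) le_rfl (fun e he hlt => by omega)

theorem pvAppend_grow (s : List Char) (k : Nat) :
    s.length < (s ++ PySem.Int.toChars (k : Int)).length := by
  rw [List.length_append]
  have h1 : 1 ≤ (PySem.Int.toChars (k : Int)).length :=
    List.length_pos_iff.mpr (pvToChars_ne_nil k)
  omega

theorem pvNotPrime_of_false (k : Nat) (h : ¬ pvIsPrimeB k = true) : ¬ Nat.Prime k := by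
  rw [pvIsPrimeB_eq] at h
  simpa using h

-- while len(chars) < n: if _is_prime(k): chars.extend(str(k)); k += 1
def pvLoopB (n k : Nat) (s : List Char) : List Char :=
  if hs : s.length < n then
    pvLoopB n (k + 1) (if pvIsPrimeB k then s ++ PySem.Int.toChars (k : Int) else s)
  else s
termination_by (n - s.length, pvNextPrimeGap k)
decreasing_by
  split
  next hp => exact pvLexLeft (pvDecGrow n s.length _ hs (pvAppend_grow s k)) _ _
  next hp => exact pvLexRight _ (pvNextPrimeGap_decr k (pvNotPrime_of_false k hp))

def solution_alt (i : Int) : String :=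
  if i + 5 ≤ 0 then "" else
    let s := pvLoopB (i + 5).toNat 2 []
    -- ''.join(chars)[:n][-5:]
    String.ofList
      (PySem.List.slice (PySem.List.slice s none (some (i + 5))) (some (-5)) none)

-- ===== PRECONDITION & SPEC =====
def Spec_solution (i : Int) (out : String) : Prop := out = solution_alt i
instance (i : Int) (out : String) : Decidable (Spec_solution i out) := by unfold Spec_solution; infer_instance

-- ===== CLAIM (what is proved, stated in full; the proofs are below) =====
def Claim_equal_solution : Prop := ∀ (i : Int), Dom_solution i → Spec_solution i (solution i)

-- ===== LEMMAS AND PROOFS =====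

theorem pvLoops_eq (n k : Nat) (s : List Char) (primes : List Nat)
    (hk : 2 ≤ k) (hp : ∀ p, p ∈ primes ↔ Nat.Prime p ∧ p < k) (hs : s.length ≤ n) :
    pvLoopA n primes k s hk hp = (pvLoopB n k s).take n := by
  rw [pvLoopA, pvLoopB]
  by_cases hlt : s.length < n
  · rw [dif_pos hlt, dif_pos hlt]
    by_cases hd : primes.any (fun p => k % p == 0) = true
    · rw [dif_pos hd]
      have hnp : ¬ Nat.Prime k := (pvAnyDiv_iff k primes hk hp).mp hd
      have hB : pvIsPrimeB k = false := by rw [pvIsPrimeB_eq]; simp [hnp]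
      rw [if_neg (by simp [hB])]
      exact pvLoops_eq n (k + 1) s primes (by omega) _ hs
    · rw [dif_neg hd]
      have hkp : Nat.Prime k := by
        by_contra hnp
        exact hd ((pvAnyDiv_iff k primes hk hp).mpr hnp)
      have hB : pvIsPrimeB k = true := by rw [pvIsPrimeB_eq]; simp [hkp]
      rw [if_pos (by simp [hB])]
      rw [pvAddChars_eq n _ s hs]
      by_cases hfit : (s ++ PySem.Int.toChars (k : Int)).length ≤ n
      · rw [List.take_of_length_le hfit]
        exact pvLoops_eq n (k + 1) (s ++ PySem.Int.toChars (k : Int))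
          (primes ++ [k]) (by omega) _ hfit
      · -- overflow: A's string reaches exactly n, both loops stop on the next test
        push_neg at hfit
        rw [pvLoopA, pvLoopB]
        rw [dif_neg (by rw [List.length_take]; omega),
            dif_neg (by omega)]
  · rw [dif_neg hlt, dif_neg hlt, List.take_of_length_le hs]
termination_by (n - s.length, pvNextPrimeGap k)
decreasing_by
  · exact pvLexRight _ (pvNextPrimeGap_decr k ((pvAnyDiv_iff k primes hk hp).mp hd))
  · exact pvLexLeft (pvDecGrow n s.length _ hlt (pvAppend_grow s k)) _ _

-- ===== VERDICT (by name: the statement is the Claim_ definition above) =====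
theorem solution_spec : Claim_equal_solution := by
  intro i _
  unfold Spec_solution solution solution_alt
  by_cases h : i + 5 ≤ 0
  · rw [if_pos h]
    have hn : (i + 5).toNat = 0 := by omega
    rw [hn, pvLoopA, dif_neg (by simp)]
    rfl
  · rw [if_neg h]
    rw [pvLoops_eq (i + 5).toNat 2 [] [] (by omega) _ (by simp)]
    show String.ofList (PySem.List.slice
        (List.take (i + 5).toNat (pvLoopB (i + 5).toNat 2 [])) (some (-5)) none) =
      String.ofList (PySem.List.slice
        (PySem.List.slice (pvLoopB (i + 5).toNat 2 []) none (some (i + 5))) (some (-5)) none)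
    rw [PySem.List.slice_to _ (show (0:Int) ≤ i + 5 by omega)]
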